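-- pv_equiv track=rewrite | github.com/Monikannan/Session-19 | program 4.py | find_pillow_holder
-- ===== SOURCE A (Python) =====
-- def find_pillow_holder(n, time):
--     forward = True
--     current_holder = 1
--     for _ in range(time):
--         if forward:
--             current_holder += 1
--             if current_holder == n:
--                 forward = False
--         else:
--             current_holder -= 1
--             if current_holder == 1:
--                 forward = True
--     return current_holder
-- ===== SOURCE B (Python) =====
-- def find_pillow_holder(n, time):
--     # One player, or no passes made yet: person 1 still holds the pillow.
--     if n == 1 or time <= 0:
--         return 1
--     # The pillow's path is periodic with period 2*(n-1): up 1..n, then back down.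
--     r = time % (2 * (n - 1))
--     return 1 + r if r < n else 2 * n - 1 - r
-- ===== Notes on version B (the rewrite author's own statement) =====
-- stated objective: faster
-- what changed: Replaces the step-by-step bounce simulation over range(time) with a closed-form modular computation (reduce time mod 2*(n-1) and reflect); Pre_ excludes nonpositive player counts n <= 0, where A's walker never meets a wall and returns the meaningless 1+time while B's nonpositive modulus gives another meaningless value.
-- intended difference: For n = 1 with time >= 1, A returns 1 + time because its walker can never hit the n-wall check after incrementing past it, while B returns 1 - the only player always holds the pillow, which is the intended value. — e.g. on find_pillow_holder(1, 3): A returns 4, B returns 1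
-- outside the precondition, e.g. on find_pillow_holder(0, 2): A returns 3, B returns -1; on find_pillow_holder(-1, 5): A returns 6, B returns -2
import Mathlib
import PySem

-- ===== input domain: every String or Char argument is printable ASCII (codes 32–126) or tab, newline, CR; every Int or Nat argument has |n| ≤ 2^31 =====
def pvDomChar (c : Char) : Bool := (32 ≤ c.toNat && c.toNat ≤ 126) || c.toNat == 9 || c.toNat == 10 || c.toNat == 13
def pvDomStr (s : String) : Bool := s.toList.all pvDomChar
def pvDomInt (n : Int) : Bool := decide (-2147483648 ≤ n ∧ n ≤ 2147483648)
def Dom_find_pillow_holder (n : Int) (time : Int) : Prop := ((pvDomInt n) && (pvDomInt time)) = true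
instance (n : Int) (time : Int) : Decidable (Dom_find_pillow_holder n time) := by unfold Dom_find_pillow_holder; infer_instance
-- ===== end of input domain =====

-- B replaces A's step-by-step bounce simulation with a closed-form modular reflection; for the degenerate n = 1 with passes, A's walker runs away (1 + time) while B returns 1, stated as D_.


-- ===== PORT A =====
-- one iteration of A's for-body on the state (forward, current_holder)
def pillowStep (n : Int) (s : Bool × Int) : Bool × Int :=
  if s.1 then
    let c := s.2 + 1
    (if c = n then false else true, c)
  else
    let c := s.2 - 1
    (if c = 1 then true else false, c)

def find_pillow_holder (n : Int) (time : Int) : Int :=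
  ((List.range time.toNat).foldl (fun s _ => pillowStep n s) (true, 1)).2

-- ===== PORT B =====
def find_pillow_holder_alt (n : Int) (time : Int) : Int :=
  if n = 1 ∨ time ≤ 0 then 1
  else
    let r := PySem.Int.mod time (2 * (n - 1))
    if r < n then 1 + r else 2 * n - 1 - r

-- ===== PRECONDITION & SPEC =====
-- Pre_ excludes nonpositive player counts n ≤ 0, where A's walker never meets a wall and
-- returns the meaningless 1 + time while B's nonpositive modulus gives another meaningless value.
def Pre_find_pillow_holder (n : Int) (time : Int) : Prop := 1 ≤ n
instance (n : Int) (time : Int) : Decidable (Pre_find_pillow_holder n time) := by unfold Pre_find_pillow_holder; infer_instance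
def pvWitness_find_pillow_holder : Int × Int := (3, 4)

-- For n = 1 with time ≥ 1, A returns 1 + time because its walker can never hit the n-wall check
-- after incrementing past it, while B returns 1 — the only player always holds the pillow,
-- which is the intended value.
def D_find_pillow_holder (n : Int) (time : Int) : Prop := n = 1 ∧ 1 ≤ time
instance (n : Int) (time : Int) : Decidable (D_find_pillow_holder n time) := by unfold D_find_pillow_holder; infer_instance

def Spec_find_pillow_holder (n : Int) (time : Int) (out : Int) : Prop := ¬ D_find_pillow_holder n time → out = find_pillow_holder_alt n time
instance (n : Int) (time : Int) (out : Int) : Decidable (Spec_find_pillow_holder n time out) := by unfold Spec_find_pillow_holder; infer_instance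

def pvDiffWitness_find_pillow_holder : Int × Int := (1, 3)
def pvDiffWitnessOut_find_pillow_holder : Int × Int := (4, 1)

-- ===== CLAIM (what is proved, stated in full; the proofs are below) =====
def Claim_unchanged_find_pillow_holder : Prop := ∀ (n : Int) (time : Int), Dom_find_pillow_holder n time → Pre_find_pillow_holder n time → Spec_find_pillow_holder n time (find_pillow_holder n time)
def Claim_changed_find_pillow_holder : Prop := Dom_find_pillow_holder (pvDiffWitness_find_pillow_holder.1) (pvDiffWitness_find_pillow_holder.2) ∧ Pre_find_pillow_holder (pvDiffWitness_find_pillow_holder.1) (pvDiffWitness_find_pillow_holder.2) ∧ D_find_pillow_holder (pvDiffWitness_find_pillow_holder.1) (pvDiffWitness_find_pillow_holder.2) ∧ find_pillow_holder (pvDiffWitness_find_pillow_holder.1) (pvDiffWitness_find_pillow_holder.2) = pvDiffWitnessOut_find_pillow_holder.1 ∧ find_pillow_holder_alt (pvDiffWitness_find_pillow_holder.1) (pvDiffWitness_find_pillow_holder.2) = pvDiffWitnessOut_find_pillow_holder.2 ∧ pvDiffWitnessOut_find_pillow_holder.1 ≠ pvDiffWitnessOut_find_pillow_holder.2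
def Claim_exact_find_pillow_holder : Prop := ∀ (n : Int) (time : Int), Dom_find_pillow_holder n time → Pre_find_pillow_holder n time → D_find_pillow_holder n time → find_pillow_holder n time ≠ find_pillow_holder_alt n time

-- ===== LEMMAS AND PROOFS =====

-- closed form of A's loop state after k iterations, when 2 ≤ n
def pillowState (n : Int) (k : Nat) : Bool × Int :=
  let r := (k : Int) % (2 * (n - 1))
  if r ≤ n - 2 then (true, 1 + r) else (false, 2 * n - 1 - r)

theorem pillowState_zero (n : Int) (hn : 2 ≤ n) : pillowState n 0 = (true, 1) := by
  simp [pillowState]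
  omega

theorem pillowState_step (n : Int) (hn : 2 ≤ n) (k : Nat) :
    pillowStep n (pillowState n k) = pillowState n (k + 1) := by
  have hm : 0 < 2 * (n - 1) := by omega
  have h0 : 0 ≤ (k : Int) % (2 * (n - 1)) := Int.emod_nonneg _ (by omega)
  have h1 : (k : Int) % (2 * (n - 1)) < 2 * (n - 1) := Int.emod_lt_of_pos _ hm
  have hsucc : ((k : Int) + 1) % (2 * (n - 1)) =
      if (k : Int) % (2 * (n - 1)) = 2 * (n - 1) - 1 then 0
      else (k : Int) % (2 * (n - 1)) + 1 := by
    split_ifs with h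
    · have he : (k : Int) + 1 = ((k : Int) / (2 * (n - 1)) + 1) * (2 * (n - 1)) := by
        have := Int.mul_ediv_add_emod (k : Int) (2 * (n - 1))
        nlinarith [this]
      rw [he, Int.mul_emod_left]
    · have h2 : (1 : Int) % (2 * (n - 1)) = 1 := Int.emod_eq_of_lt (by omega) (by omega)
      rw [Int.add_emod, h2]
      exact Int.emod_eq_of_lt (by omega) (by omega)
  simp only [pillowState, pillowStep, Nat.cast_add, Nat.cast_one]
  rw [show ((k : Int) + 1) % (2 * (n - 1)) = _ from hsucc]
  split_ifs <;> simp_all [Prod.mk.injEq] <;> omega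

theorem foldl_pillow (n : Int) (hn : 2 ≤ n) (k : Nat) :
    (List.range k).foldl (fun s _ => pillowStep n s) (true, 1) = pillowState n k := by
  induction k with
  | zero => simpa using (pillowState_zero n hn).symm
  | succ k ih =>
      rw [List.range_succ, List.foldl_append, ih]
      simpa using pillowState_step n hn k

theorem foldl_pillow_small (n : Int) (hn : n ≤ 1) (k : Nat) :
    (List.range k).foldl (fun s _ => pillowStep n s) (true, 1) = (true, 1 + (k : Int)) := by
  induction k with
  | zero => simp
  | succ k ih =>
      rw [List.range_succ, List.foldl_append, ih]
      have hne : ¬ (1 + (k : Int) + 1 = n) := by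
        have : (0 : Int) ≤ (k : Int) := Int.natCast_nonneg k
        omega
      simp [pillowStep, hne]
      omega

-- ===== VERDICT (by name: the statement is the Claim_ definition above) =====
theorem find_pillow_holder_spec : Claim_unchanged_find_pillow_holder := by
  intro n time _ hpre hd
  have hn1 : 1 ≤ n := hpre
  have hnd : ¬ (n = 1 ∧ 1 ≤ time) := hd
  unfold find_pillow_holder find_pillow_holder_alt
  by_cases hb : n = 1 ∨ time ≤ 0
  · rw [if_pos hb]
    have ht0 : time ≤ 0 := by
      rcases hb with h1 | h0
      · by_contra h
        exact hnd ⟨h1, by omega⟩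
      · exact h0
    have : time.toNat = 0 := Int.toNat_of_nonpos ht0
    simp [this]
  · push_neg at hb
    obtain ⟨hne1, hpos⟩ := hb
    have hn : 2 ≤ n := by omega
    have ht : 0 ≤ time := by omega
    rw [if_neg (by push_neg; exact ⟨hne1, hpos⟩)]
    rw [foldl_pillow n hn]
    have hcast : (time.toNat : Int) = time := Int.toNat_of_nonneg ht
    have hmod : PySem.Int.mod time (2 * (n - 1)) = (time.toNat : Int) % (2 * (n - 1)) := by
      rw [hcast, PySem.Int.mod_eq_emod_of_pos (by omega)]
    have h0 : 0 ≤ (time.toNat : Int) % (2 * (n - 1)) := Int.emod_nonneg _ (by omega)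
    have h1 : (time.toNat : Int) % (2 * (n - 1)) < 2 * (n - 1) := Int.emod_lt_of_pos _ (by omega)
    simp only [hmod, pillowState]
    split_ifs <;> omega

theorem find_pillow_holder_changed : Claim_changed_find_pillow_holder := by
  unfold Claim_changed_find_pillow_holder; decide

theorem find_pillow_holder_tight : Claim_exact_find_pillow_holder := by
  intro n time _ _ hd
  obtain ⟨hn1, ht1⟩ := (show n = 1 ∧ 1 ≤ time from hd)
  subst hn1
  unfold find_pillow_holder find_pillow_holder_alt
  rw [foldl_pillow_small 1 le_rfl]
  have hcast : (time.toNat : Int) = time := Int.toNat_of_nonneg (by omega)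
  rw [if_pos (Or.inl rfl)]
  omega
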